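-- pv_equiv track=rewrite | github.com/pc5401/my_BOJ | 백준/Gold/1234. 크리스마스 트리/크리스마스 트리.py | solve
-- ===== SOURCE A (Python) =====
-- from functools import lru_cache
--
-- def solve(N, R, G, B):
--     maxk = N
--     fact = [1] * (maxk + 1)
--     for i in range(2, maxk + 1):
--         fact[i] = fact[i-1] * i
--
--     def nCk(n, k):
--         if k < 0 or k > n: return 0
--         return fact[n] // (fact[k] * fact[n-k])
--
--     @lru_cache(None)
--     def dp(level, r, g, b):
--         if level > N:
--             return 1
--         ans = 0
--         if r >= level:
--             ans += dp(level + 1, r - level, g, b)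
--         if g >= level:
--             ans += dp(level + 1, r, g - level, b)
--         if b >= level:
--             ans += dp(level + 1, r, g, b - level)
--         if level % 2 == 0:
--             half = level // 2
--             ways = nCk(level, half)
--             if r >= half and g >= half:
--                 ans += ways * dp(level + 1, r - half, g - half, b)
--             if r >= half and b >= half:
--                 ans += ways * dp(level + 1, r - half, g, b - half)
--             if g >= half and b >= half:
--                 ans += ways * dp(level + 1, r, g - half, b - half)
--         if level % 3 == 0:
--             third = level // 3
--             ways = fact[level] // (fact[third] * fact[third] * fact[third])
--             if r >= third and g >= third and b >= third:
--                 ans += ways * dp(level + 1, r - third, g - third, b - third)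
--         return ans
--
--     return dp(1, R, G, B)
-- ===== SOURCE B (Python) =====
-- def solve(N, R, G, B):
--     # Forward (bottom-up) path-counting DP over a frontier dictionary:
--     # frontier maps (red_used, green_used) -> number of decorated trees using
--     # exactly those counts through the levels processed so far (blue usage is
--     # determined by the running total of balls).  The answer is the sum of the
--     # final frontier's values.
--     fact = [1] * (N + 1) if N >= 0 else []
--     for i in range(2, N + 1):
--         fact[i] = fact[i - 1] * i
--     frontier = {(0, 0): 1}
--     used = 0
--     for level in range(1, N + 1):
--         moves = [(level, 0, 1), (0, level, 1), (0, 0, 1)]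
--         if level % 2 == 0:
--             h = level // 2
--             w = fact[level] // (fact[h] * fact[h])
--             moves += [(h, h, w), (h, 0, w), (0, h, w)]
--         if level % 3 == 0:
--             t = level // 3
--             moves.append((t, t, fact[level] // (fact[t] * fact[t] * fact[t])))
--         used += level
--         nxt = {}
--         for (ru, gu), ways in frontier.items():
--             for dx, dy, w in moves:
--                 nru, ngu = ru + dx, gu + dy
--                 nbu = used - nru - ngu
--                 dz = level - dx - dy
--                 if (dx == 0 or nru <= R) and (dy == 0 or ngu <= G) and (dz == 0 or nbu <= B):
--                     key = (nru, ngu)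
--                     nxt[key] = nxt.get(key, 0) + ways * w
--         frontier = nxt
--     return sum(frontier.values())
-- ===== Notes on version B (the rewrite author's own statement) =====
-- stated objective: alternative
-- what changed: B replaces A's memoized top-down recursion (counting completions of each residual state backward) by an iterative forward path-counting DP: a frontier dictionary keyed by (red used, green used) is pushed level by level through the weighted level splits and the answer is the sum of the final frontier's values; no recursion and no cache remain.
import Mathlib
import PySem

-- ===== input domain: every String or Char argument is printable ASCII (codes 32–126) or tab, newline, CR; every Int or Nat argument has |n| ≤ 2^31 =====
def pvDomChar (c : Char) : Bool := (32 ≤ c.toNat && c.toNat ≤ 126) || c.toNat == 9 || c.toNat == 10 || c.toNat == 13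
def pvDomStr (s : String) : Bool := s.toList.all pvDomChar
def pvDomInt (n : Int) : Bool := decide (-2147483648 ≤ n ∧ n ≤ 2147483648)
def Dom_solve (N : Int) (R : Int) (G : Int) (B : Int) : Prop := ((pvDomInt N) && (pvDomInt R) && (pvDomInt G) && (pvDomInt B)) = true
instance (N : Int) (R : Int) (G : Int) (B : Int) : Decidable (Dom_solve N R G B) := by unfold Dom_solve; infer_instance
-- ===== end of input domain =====

-- B counts FORWARD: an iterative level-by-level path-counting DP over a frontier
-- dictionary keyed by (red used, green used) — number of ways to reach each usage
-- state — summed at the end, instead of A's memoized top-down recursion counting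
-- completions backward; same values everywhere (alternative structure, no speed claim).

-- ===== PORT A =====
def factStep (fact : List Int) (i : Int) : List Int :=
  PySem.List.pySetD fact i (PySem.List.pyGetD fact (i - 1) 0 * i)
def buildFact (N : Int) : List Int :=
  (PySem.List.pyRange 2 (N + 1) 1).foldl factStep (List.replicate (N + 1).toNat 1)
def nCkA (fact : List Int) (n k : Int) : Int :=
  if k < 0 ∨ k > n then 0
  else PySem.Int.floordiv (PySem.List.pyGetD fact n 0)
        (PySem.List.pyGetD fact k 0 * PySem.List.pyGetD fact (n - k) 0)
def dpA (N : Int) (fact : List Int) : Nat → Int → Int → Int → Int → Int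
  | 0, level, _, _, _ => if level > N then 1 else 0
  | fuel + 1, level, r, g, b =>
    if level > N then 1
    else
      let ans : Int := 0
      let ans := if r ≥ level then ans + dpA N fact fuel (level + 1) (r - level) g b else ans
      let ans := if g ≥ level then ans + dpA N fact fuel (level + 1) r (g - level) b else ans
      let ans := if b ≥ level then ans + dpA N fact fuel (level + 1) r g (b - level) else ans
      let ans := if PySem.Int.mod level 2 = 0 then
          let half := PySem.Int.floordiv level 2
          let ways := nCkA fact level half
          let ans := if r ≥ half ∧ g ≥ half then ans + ways * dpA N fact fuel (level + 1) (r - half) (g - half) b else ans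
          let ans := if r ≥ half ∧ b ≥ half then ans + ways * dpA N fact fuel (level + 1) (r - half) g (b - half) else ans
          if g ≥ half ∧ b ≥ half then ans + ways * dpA N fact fuel (level + 1) r (g - half) (b - half) else ans
        else ans
      if PySem.Int.mod level 3 = 0 then
        let third := PySem.Int.floordiv level 3
        let ways := PySem.Int.floordiv (PySem.List.pyGetD fact level 0)
          (PySem.List.pyGetD fact third 0 * PySem.List.pyGetD fact third 0 * PySem.List.pyGetD fact third 0)
        if r ≥ third ∧ g ≥ third ∧ b ≥ third then ans + ways * dpA N fact fuel (level + 1) (r - third) (g - third) (b - third) else ans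
      else ans
def solve (N : Int) (R : Int) (G : Int) (B : Int) : Int :=
  dpA N (buildFact N) (N.toNat + 1) 1 R G B

-- ===== PORT B =====
def movesB (fact : List Int) (level : Int) : List (Int × Int × Int) :=
  [(level, 0, 1), (0, level, 1), (0, 0, 1)]
  ++ (if PySem.Int.mod level 2 = 0 then
        let h := PySem.Int.floordiv level 2
        let w := PySem.Int.floordiv (PySem.List.pyGetD fact level 0)
          (PySem.List.pyGetD fact h 0 * PySem.List.pyGetD fact h 0)
        [(h, h, w), (h, 0, w), (0, h, w)]
      else [])
  ++ (if PySem.Int.mod level 3 = 0 then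
        let t := PySem.Int.floordiv level 3
        [(t, t, PySem.Int.floordiv (PySem.List.pyGetD fact level 0)
          (PySem.List.pyGetD fact t 0 * PySem.List.pyGetD fact t 0 * PySem.List.pyGetD fact t 0))]
      else [])

def stepB (R G B : Int) (fact : List Int)
    (st : PySem.Dict (Int × Int) Int × Int) (level : Int) :
    PySem.Dict (Int × Int) Int × Int :=
  let used := st.2 + level
  let nxt := st.1.items.foldl (fun nxt item =>
      (movesB fact level).foldl (fun nxt m =>
          let nru := item.1.1 + m.1
          let ngu := item.1.2 + m.2.1
          let nbu := used - nru - ngu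
          let dz := level - m.1 - m.2.1
          if (m.1 = 0 ∨ nru ≤ R) ∧ (m.2.1 = 0 ∨ ngu ≤ G) ∧ (dz = 0 ∨ nbu ≤ B) then
            nxt.insert (nru, ngu) (nxt.getD (nru, ngu) 0 + item.2 * m.2.2)
          else nxt)
        nxt)
    PySem.Dict.empty
  (nxt, used)

def solve_alt (N : Int) (R : Int) (G : Int) (B : Int) : Int :=
  let fact := buildFact N
  let fin := (PySem.List.pyRange 1 (N + 1) 1).foldl (stepB R G B fact)
    (PySem.Dict.ofList [((0, 0), 1)], 0)
  fin.1.values.sum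

-- ===== PRECONDITION & SPEC =====
def Spec_solve (N : Int) (R : Int) (G : Int) (B : Int) (out : Int) : Prop := out = solve_alt N R G B
instance (N : Int) (R : Int) (G : Int) (B : Int) (out : Int) : Decidable (Spec_solve N R G B out) := by unfold Spec_solve; infer_instance

-- ===== CLAIM =====
def Claim_equal_solve : Prop := ∀ (N : Int) (R : Int) (G : Int) (B : Int), Dom_solve N R G B → Spec_solve N R G B (solve N R G B)

-- ===== LEMMAS AND PROOFS =====

def wsum (φ : Int × Int → Int) (d : PySem.Dict (Int × Int) Int) : Int :=
  (d.items.map (fun p => p.2 * φ p.1)).sum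

lemma wsum_replace (φ : Int × Int → Int) (l : List ((Int × Int) × Int)) (k : Int × Int)
    (old v : Int) (hnd : (l.map Prod.fst).Nodup) (hmem : (k, old) ∈ l) :
    ((l.map (fun p => if p.1 == k then (k, v) else p)).map (fun p => p.2 * φ p.1)).sum
      = (l.map (fun p => p.2 * φ p.1)).sum - old * φ k + v * φ k := by
  induction l with
  | nil => simp at hmem
  | cons p tl ih =>
    simp only [List.map_cons, List.nodup_cons] at hnd
    by_cases hpk : p.1 = k
    · have hknotl : k ∉ tl.map Prod.fst := hpk ▸ hnd.1
      have hp : p = (k, old) := by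
        rcases List.mem_cons.mp hmem with h | h
        · exact h.symm
        · exact absurd (List.mem_map.mpr ⟨_, h, rfl⟩) hknotl
      have htl : tl.map (fun p => if p.1 == k then (k, v) else p) = tl := by
        rw [List.map_congr_left (fun q hq => ?_), List.map_id']
        have : q.1 ≠ k := fun he => hknotl (List.mem_map.mpr ⟨q, hq, he⟩)
        simp [this]
      simp only [List.map_cons, htl, hp, beq_self_eq_true, if_pos, List.sum_cons]
      ring
    · have hmem' : (k, old) ∈ tl := by
        rcases List.mem_cons.mp hmem with h | h
        · exact absurd (congrArg Prod.fst h.symm) hpk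
        · exact h
      have : (p.1 == k) = false := by simp [hpk]
      simp only [List.map_cons, this, Bool.false_eq_true, List.sum_cons,
        ih hnd.2 hmem', if_false]
      ring

lemma wsum_insert_acc (φ : Int × Int → Int) (d : PySem.Dict (Int × Int) Int)
    (k : Int × Int) (w : Int) (hnd : d.keys.Nodup) :
    wsum φ (d.insert k (d.getD k 0 + w)) = wsum φ d + w * φ k := by
  unfold wsum
  by_cases hc : d.contains k = true
  · have hsome : (d.get? k).isSome := by rw [← PySem.Dict.contains_eq_isSome_get? d k]; exact hc
    obtain ⟨old, hold⟩ := Option.isSome_iff_exists.mp hsome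
    have hmem : (k, old) ∈ d.items := PySem.Dict.mem_items_of_get?_eq_some d hold
    have hgd : d.getD k 0 = old := PySem.Dict.getD_of_get?_eq_some d 0 hold
    rw [PySem.Dict.items_insert_of_contains d _ hc]
    have hnd' : (d.items.map Prod.fst).Nodup := hnd
    rw [wsum_replace φ d.items k old _ hnd' hmem, hgd]
    ring
  · rw [PySem.Dict.items_insert_of_not_contains d _ (by simpa using hc)]
    have h0 : d.getD k 0 = 0 := PySem.Dict.getD_of_not_contains d 0 (by simpa using hc)
    simp [h0]

lemma foldl_dict_inv {α : Type} (φ : Int × Int → Int)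
    (f : PySem.Dict (Int × Int) Int → α → PySem.Dict (Int × Int) Int) (g : α → Int)
    (hf : ∀ d x, d.keys.Nodup → (f d x).keys.Nodup ∧ wsum φ (f d x) = wsum φ d + g x)
    (l : List α) :
    ∀ (d : PySem.Dict (Int × Int) Int), d.keys.Nodup →
      (l.foldl f d).keys.Nodup ∧ wsum φ (l.foldl f d) = wsum φ d + (l.map g).sum := by
  induction l with
  | nil => intro d hd; simpa using hd
  | cons x xs ih =>
    intro d hd
    obtain ⟨h1, h2⟩ := hf d x hd
    obtain ⟨h3, h4⟩ := ih (f d x) h1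
    refine ⟨h3, ?_⟩
    simp only [List.foldl_cons, List.map_cons, List.sum_cons, h4, h2]
    ring

lemma ite_acc (c : Prop) [Decidable c] (x a : Int) : (if c then x + a else x) = x + (if c then a else 0) := by
  split_ifs <;> simp

lemma level_sum (N level r g b : Int) (fuel : Nat)
    (h1 : 1 ≤ level) (hN : level ≤ N) :
    ((movesB (buildFact N) level).map (fun m =>
        if (m.1 = 0 ∨ m.1 ≤ r) ∧ (m.2.1 = 0 ∨ m.2.1 ≤ g) ∧
            (level - m.1 - m.2.1 = 0 ∨ level - m.1 - m.2.1 ≤ b) then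
          m.2.2 * dpA N (buildFact N) fuel (level + 1) (r - m.1) (g - m.2.1)
            (b - (level - m.1 - m.2.1))
        else 0)).sum
      = dpA N (buildFact N) (fuel + 1) level r g b := by
  have hl0 : ¬ (level = 0) := by omega
  have hlN : ¬ (level > N) := by omega
  by_cases hm2 : PySem.Int.mod level 2 = 0 <;> by_cases hm3 : PySem.Int.mod level 3 = 0
  · obtain ⟨p, hp⟩ : (2:Int) ∣ level := (PySem.Int.mod_eq_zero_iff_dvd level 2).mp hm2
    obtain ⟨q, hq⟩ : (3:Int) ∣ level := (PySem.Int.mod_eq_zero_iff_dvd level 3).mp hm3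
    have hhalf : PySem.Int.floordiv level 2 = p := by
      rw [hp, PySem.Int.floordiv_eq_ediv_of_pos (by norm_num), Int.mul_ediv_cancel_left _ (by norm_num)]
    have hthird : PySem.Int.floordiv level 3 = q := by
      rw [hq, PySem.Int.floordiv_eq_ediv_of_pos (by norm_num), Int.mul_ediv_cancel_left _ (by norm_num)]
    have cpair : nCkA (buildFact N) level p = PySem.Int.floordiv (PySem.List.pyGetD (buildFact N) level 0)
        (PySem.List.pyGetD (buildFact N) p 0 * PySem.List.pyGetD (buildFact N) p 0) := by
      unfold nCkA
      rw [if_neg (by omega), show level - p = p from by omega]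
    have hp0 : ¬ (p = 0) := by omega
    have hq0 : ¬ (q = 0) := by omega
    simp only [movesB, dpA, hm2, hm3, if_neg hlN, if_true, List.cons_append,
      List.nil_append, List.map_cons, List.map_nil, List.sum_cons, List.sum_nil]
    rw [hhalf, hthird, cpair]
    rw [show level - p - p = 0 from by omega, show level - p - 0 = p from by omega,
      show level - 0 - p = p from by omega, show level - q - q = q from by omega]
    simp only [sub_zero, sub_self, true_or, true_and, and_true,
      hl0, hp0, hq0, false_or, ge_iff_le, add_zero, zero_add, ite_acc]
    ring
  · obtain ⟨p, hp⟩ : (2:Int) ∣ level := (PySem.Int.mod_eq_zero_iff_dvd level 2).mp hm2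
    have hhalf : PySem.Int.floordiv level 2 = p := by
      rw [hp, PySem.Int.floordiv_eq_ediv_of_pos (by norm_num), Int.mul_ediv_cancel_left _ (by norm_num)]
    have cpair : nCkA (buildFact N) level p = PySem.Int.floordiv (PySem.List.pyGetD (buildFact N) level 0)
        (PySem.List.pyGetD (buildFact N) p 0 * PySem.List.pyGetD (buildFact N) p 0) := by
      unfold nCkA
      rw [if_neg (by omega), show level - p = p from by omega]
    have hp0 : ¬ (p = 0) := by omega
    simp only [movesB, dpA, hm2, hm3, if_neg hlN, if_true, if_false, List.cons_append,
      List.nil_append, List.append_nil, List.map_cons, List.map_nil, List.sum_cons, List.sum_nil]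
    rw [hhalf, cpair]
    rw [show level - p - p = 0 from by omega, show level - p - 0 = p from by omega,
      show level - 0 - p = p from by omega]
    simp only [sub_zero, sub_self, true_or, true_and, and_true, one_mul,
      hl0, hp0, false_or, ge_iff_le, add_zero, zero_add, ite_acc]
    ring
  · obtain ⟨q, hq⟩ : (3:Int) ∣ level := (PySem.Int.mod_eq_zero_iff_dvd level 3).mp hm3
    have hthird : PySem.Int.floordiv level 3 = q := by
      rw [hq, PySem.Int.floordiv_eq_ediv_of_pos (by norm_num), Int.mul_ediv_cancel_left _ (by norm_num)]
    have hq0 : ¬ (q = 0) := by omega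
    simp only [movesB, dpA, hm2, hm3, if_neg hlN, if_true, if_false, List.cons_append,
      List.nil_append, List.append_nil, List.map_cons, List.map_nil, List.sum_cons, List.sum_nil]
    rw [hthird]
    rw [show level - q - q = q from by omega]
    simp only [sub_zero, sub_self, true_or, true_and, and_true, one_mul,
      hl0, hq0, false_or, ge_iff_le, add_zero, zero_add, ite_acc]
    ring
  · simp only [movesB, dpA, hm2, hm3, if_neg hlN, if_false, List.append_nil,
      List.map_cons, List.map_nil, List.sum_cons, List.sum_nil]
    simp only [sub_zero, sub_self, true_or, true_and, and_true, one_mul,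
      hl0, false_or, ge_iff_le, add_zero, zero_add, ite_acc]
    ring

lemma stepB_inv (N R G B u level : Int) (fuel : Nat) (d : PySem.Dict (Int × Int) Int)
    (h1 : 1 ≤ level) (hN : level ≤ N) :
    (stepB R G B (buildFact N) (d, u) level).2 = u + level ∧
    (stepB R G B (buildFact N) (d, u) level).1.keys.Nodup ∧
    wsum (fun p => dpA N (buildFact N) fuel (level + 1) (R - p.1) (G - p.2)
        (B - (u + level - p.1 - p.2)))
      (stepB R G B (buildFact N) (d, u) level).1
      = wsum (fun p => dpA N (buildFact N) (fuel + 1) level (R - p.1) (G - p.2)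
          (B - (u - p.1 - p.2))) d := by
  refine ⟨rfl, ?_, ?_⟩
  all_goals {
    simp only [stepB]
    have key := foldl_dict_inv
      (fun p => dpA N (buildFact N) fuel (level + 1) (R - p.1) (G - p.2)
        (B - (u + level - p.1 - p.2)))
      (fun nxt item =>
        (movesB (buildFact N) level).foldl (fun nxt m =>
            if (m.1 = 0 ∨ item.1.1 + m.1 ≤ R) ∧ (m.2.1 = 0 ∨ item.1.2 + m.2.1 ≤ G) ∧
                (level - m.1 - m.2.1 = 0 ∨ u + level - (item.1.1 + m.1) - (item.1.2 + m.2.1) ≤ B) then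
              nxt.insert (item.1.1 + m.1, item.1.2 + m.2.1)
                (nxt.getD (item.1.1 + m.1, item.1.2 + m.2.1) 0 + item.2 * m.2.2)
            else nxt)
          nxt)
      (fun x => x.2 * dpA N (buildFact N) (fuel + 1) level (R - x.1.1) (G - x.1.2)
        (B - (u - x.1.1 - x.1.2)))
      ?hf d.items PySem.Dict.empty (by simp [PySem.Dict.empty])
    case hf =>
      intro d0 x hd0
      have inner := foldl_dict_inv
        (fun p => dpA N (buildFact N) fuel (level + 1) (R - p.1) (G - p.2)
          (B - (u + level - p.1 - p.2)))
        (fun nxt m =>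
            if (m.1 = 0 ∨ x.1.1 + m.1 ≤ R) ∧ (m.2.1 = 0 ∨ x.1.2 + m.2.1 ≤ G) ∧
                (level - m.1 - m.2.1 = 0 ∨ u + level - (x.1.1 + m.1) - (x.1.2 + m.2.1) ≤ B) then
              nxt.insert (x.1.1 + m.1, x.1.2 + m.2.1)
                (nxt.getD (x.1.1 + m.1, x.1.2 + m.2.1) 0 + x.2 * m.2.2)
            else nxt)
        (fun m =>
            if (m.1 = 0 ∨ x.1.1 + m.1 ≤ R) ∧ (m.2.1 = 0 ∨ x.1.2 + m.2.1 ≤ G) ∧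
                (level - m.1 - m.2.1 = 0 ∨ u + level - (x.1.1 + m.1) - (x.1.2 + m.2.1) ≤ B) then
              x.2 * m.2.2 * dpA N (buildFact N) fuel (level + 1) (R - (x.1.1 + m.1))
                (G - (x.1.2 + m.2.1)) (B - (u + level - (x.1.1 + m.1) - (x.1.2 + m.2.1)))
            else 0)
        ?hin (movesB (buildFact N) level) d0 hd0
      case hin =>
        intro d1 m hd1
        dsimp only
        by_cases hc : (m.1 = 0 ∨ x.1.1 + m.1 ≤ R) ∧ (m.2.1 = 0 ∨ x.1.2 + m.2.1 ≤ G) ∧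
            (level - m.1 - m.2.1 = 0 ∨ u + level - (x.1.1 + m.1) - (x.1.2 + m.2.1) ≤ B)
        · rw [if_pos hc, if_pos hc]
          refine ⟨PySem.Dict.nodup_keys_insert _ _ _ hd1, ?_⟩
          rw [wsum_insert_acc _ _ _ _ hd1]
        · rw [if_neg hc, if_neg hc]
          exact ⟨hd1, by ring⟩
      obtain ⟨hn, hw⟩ := inner
      refine ⟨hn, ?_⟩
      rw [hw]
      congr 1
      have hmap : ((movesB (buildFact N) level).map (fun m =>
            if (m.1 = 0 ∨ x.1.1 + m.1 ≤ R) ∧ (m.2.1 = 0 ∨ x.1.2 + m.2.1 ≤ G) ∧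
                (level - m.1 - m.2.1 = 0 ∨ u + level - (x.1.1 + m.1) - (x.1.2 + m.2.1) ≤ B) then
              x.2 * m.2.2 * dpA N (buildFact N) fuel (level + 1) (R - (x.1.1 + m.1))
                (G - (x.1.2 + m.2.1)) (B - (u + level - (x.1.1 + m.1) - (x.1.2 + m.2.1)))
            else 0))
          = ((movesB (buildFact N) level).map (fun m => x.2 *
              (if (m.1 = 0 ∨ m.1 ≤ R - x.1.1) ∧ (m.2.1 = 0 ∨ m.2.1 ≤ G - x.1.2) ∧
                  (level - m.1 - m.2.1 = 0 ∨ level - m.1 - m.2.1 ≤ B - (u - x.1.1 - x.1.2)) then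
                m.2.2 * dpA N (buildFact N) fuel (level + 1) ((R - x.1.1) - m.1)
                  ((G - x.1.2) - m.2.1) ((B - (u - x.1.1 - x.1.2)) - (level - m.1 - m.2.1))
              else 0))) := by
        apply List.map_congr_left
        intro m _
        have hiff : ((m.1 = 0 ∨ x.1.1 + m.1 ≤ R) ∧ (m.2.1 = 0 ∨ x.1.2 + m.2.1 ≤ G) ∧
              (level - m.1 - m.2.1 = 0 ∨ u + level - (x.1.1 + m.1) - (x.1.2 + m.2.1) ≤ B)) ↔
            ((m.1 = 0 ∨ m.1 ≤ R - x.1.1) ∧ (m.2.1 = 0 ∨ m.2.1 ≤ G - x.1.2) ∧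
              (level - m.1 - m.2.1 = 0 ∨ level - m.1 - m.2.1 ≤ B - (u - x.1.1 - x.1.2))) := by
          constructor <;> intro h <;> omega
        by_cases hc : (m.1 = 0 ∨ m.1 ≤ R - x.1.1) ∧ (m.2.1 = 0 ∨ m.2.1 ≤ G - x.1.2) ∧
            (level - m.1 - m.2.1 = 0 ∨ level - m.1 - m.2.1 ≤ B - (u - x.1.1 - x.1.2))
        · rw [if_pos (hiff.mpr hc), if_pos hc,
            show R - (x.1.1 + m.1) = (R - x.1.1) - m.1 from by ring,
            show G - (x.1.2 + m.2.1) = (G - x.1.2) - m.2.1 from by ring,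
            show B - (u + level - (x.1.1 + m.1) - (x.1.2 + m.2.1)) = (B - (u - x.1.1 - x.1.2)) - (level - m.1 - m.2.1) from by ring]
          ring
        · rw [if_neg (fun h => hc (hiff.mp h)), if_neg hc, mul_zero]
      rw [hmap, List.sum_map_mul_left, level_sum N level (R - x.1.1) (G - x.1.2)
        (B - (u - x.1.1 - x.1.2)) fuel h1 hN]
    obtain ⟨hn, hw⟩ := key
    first
      | exact hn
      | (rw [hw]; simp only [wsum, PySem.Dict.empty]; simp)
  }

lemma main_inv (N R G B : Int) (k : Nat) (hk : (k : Int) ≤ N) :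
    ((PySem.List.pyRange 1 ((k : Int) + 1) 1).foldl (stepB R G B (buildFact N))
        (PySem.Dict.ofList [((0, 0), 1)], 0)).2 = ((List.range k).map (fun i => (i : Int) + 1)).sum ∧
    ((PySem.List.pyRange 1 ((k : Int) + 1) 1).foldl (stepB R G B (buildFact N))
        (PySem.Dict.ofList [((0, 0), 1)], 0)).1.keys.Nodup ∧
    wsum (fun p => dpA N (buildFact N) (N.toNat + 1 - k) ((k : Int) + 1) (R - p.1) (G - p.2)
        (B - (((PySem.List.pyRange 1 ((k : Int) + 1) 1).foldl (stepB R G B (buildFact N))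
          (PySem.Dict.ofList [((0, 0), 1)], 0)).2 - p.1 - p.2)))
      ((PySem.List.pyRange 1 ((k : Int) + 1) 1).foldl (stepB R G B (buildFact N))
        (PySem.Dict.ofList [((0, 0), 1)], 0)).1
      = dpA N (buildFact N) (N.toNat + 1) 1 R G B := by
  induction k with
  | zero =>
    rw [show ((0 : Nat) : Int) + 1 = 1 by norm_num, PySem.List.pyRange_one_eq_nil le_rfl]
    simp only [List.foldl_nil]
    refine ⟨by simp, by decide, ?_⟩
    show (1 : Int) * dpA N (buildFact N) (N.toNat + 1 - 0) (0 + 1) (R - 0) (G - 0) (B - (0 - 0 - 0)) + 0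
      = dpA N (buildFact N) (N.toNat + 1) 1 R G B
    norm_num
  | succ k ih =>
    have hk' : (k : Int) ≤ N := by push_cast at hk ⊢; omega
    obtain ⟨hu, hnd, hws⟩ := ih hk'
    have hcast : ((k + 1 : Nat) : Int) + 1 = ((k : Int) + 1) + 1 := by push_cast; ring
    rw [hcast, PySem.List.pyRange_one_succ_right (by omega), List.foldl_append, List.foldl_cons,
      List.foldl_nil]
    set st := (PySem.List.pyRange 1 ((k : Int) + 1) 1).foldl (stepB R G B (buildFact N))
      (PySem.Dict.ofList [((0, 0), 1)], 0) with hst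
    have hstep := stepB_inv N R G B st.2 ((k : Int) + 1) (N.toNat + 1 - (k + 1)) st.1
      (by omega) (by omega)
    rw [show (st.1, st.2) = st from rfl] at hstep
    obtain ⟨h2, h3, h4⟩ := hstep
    refine ⟨?_, h3, ?_⟩
    · rw [h2, hu, List.range_succ]
      simp
    · rw [h2]
      have hfuel : (N.toNat + 1 - (k + 1)) + 1 = N.toNat + 1 - k := by omega
      rw [show ((k : Int) + 1) + 1 = ((k : Int) + 1) + 1 from rfl]
      calc wsum (fun p => dpA N (buildFact N) (N.toNat + 1 - (k + 1)) ((k : Int) + 1 + 1)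
              (R - p.1) (G - p.2) (B - (st.2 + ((k : Int) + 1) - p.1 - p.2)))
            (stepB R G B (buildFact N) st ((k : Int) + 1)).1
          = wsum (fun p => dpA N (buildFact N) ((N.toNat + 1 - (k + 1)) + 1) ((k : Int) + 1)
              (R - p.1) (G - p.2) (B - (st.2 - p.1 - p.2))) st.1 := h4
        _ = dpA N (buildFact N) (N.toNat + 1) 1 R G B := by rw [hfuel]; exact hws

lemma solve_eq (N R G B : Int) : solve N R G B = solve_alt N R G B := by
  unfold solve solve_alt
  by_cases hN0 : 0 ≤ N
  · rw [show N + 1 = ((N.toNat : Nat) : Int) + 1 by omega]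
    obtain ⟨hu, hnd, hws⟩ := main_inv N R G B N.toNat (by omega)
    set st := (PySem.List.pyRange 1 ((N.toNat : Int) + 1) 1).foldl (stepB R G B (buildFact N))
      (PySem.Dict.ofList [((0, 0), 1)], 0) with hst
    have hone : ∀ p : Int × Int, dpA N (buildFact N) (N.toNat + 1 - N.toNat) ((N.toNat : Int) + 1)
        (R - p.1) (G - p.2) (B - (st.2 - p.1 - p.2)) = 1 := by
      intro p
      rw [show N.toNat + 1 - N.toNat = 1 by omega]
      simp [dpA]
    rw [← hws]
    unfold wsum
    rw [List.map_congr_left (l := st.1.items) (g := fun p => p.2)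
      (fun p _ => by simp only [hone p.1, mul_one])]
    rfl
  · rw [PySem.List.pyRange_one_eq_nil (by omega)]
    have h1 : (1 : Int) > N := by omega
    simp [dpA, h1]
    rfl

-- ===== VERDICT =====
theorem solve_spec : Claim_equal_solve := by
  intro N R G B _
  unfold Spec_solve
  exact solve_eq N R G B
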